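-- pv_equiv track=rewrite | github.com/blonded04/sd-supplementary-cli | src/command_parser.py | _split_pipes
-- ===== SOURCE A (Python) =====
-- from typing import Optional, List, Tuple
--
-- def _split_pipes(s: str) -> List[str]:
--     parts = []
--     current = []
--     quote = None
--     escape = False
--
--     for c in s:
--         if escape:
--             current.append(c)
--             escape = False
--         elif c == '\\':
--             escape = True
--             current.append(c)
--         elif c in ('"', "'"):
--             if quote == c:
--                 quote = None
--             elif not quote:
--                 quote = c
--             current.append(c)
--         elif c == '|' and not quote:
--             parts.append(''.join(current).strip())
--             current = []
--         else:
--             current.append(c)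
--     if current:
--         parts.append(''.join(current).strip())
--     return parts
-- ===== SOURCE B (Python) =====
-- def _first_unquoted_pipe(s):
--     quote = None
--     escape = False
--     for i, c in enumerate(s):
--         if escape:
--             escape = False
--         elif c == '\\':
--             escape = True
--         elif c in ('"', "'"):
--             if quote == c:
--                 quote = None
--             elif not quote:
--                 quote = c
--         elif c == '|' and not quote:
--             return i
--     return None
--
--
-- def _split_pipes(s):
--     parts = []
--     rest = s
--     while True:
--         i = _first_unquoted_pipe(rest)
--         if i is None:
--             break
--         parts.append(rest[:i].strip())
--         rest = rest[i + 1:]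
--     if rest:
--         parts.append(rest.strip())
--     return parts
-- ===== Notes on version B (the rewrite author's own statement) =====
-- stated objective: alternative
-- what changed: Instead of one accumulating pass that builds each segment character by character, B repeatedly locates the first unquoted pipe with a helper and slices the string there, accumulating stripped slices.
import Mathlib
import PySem

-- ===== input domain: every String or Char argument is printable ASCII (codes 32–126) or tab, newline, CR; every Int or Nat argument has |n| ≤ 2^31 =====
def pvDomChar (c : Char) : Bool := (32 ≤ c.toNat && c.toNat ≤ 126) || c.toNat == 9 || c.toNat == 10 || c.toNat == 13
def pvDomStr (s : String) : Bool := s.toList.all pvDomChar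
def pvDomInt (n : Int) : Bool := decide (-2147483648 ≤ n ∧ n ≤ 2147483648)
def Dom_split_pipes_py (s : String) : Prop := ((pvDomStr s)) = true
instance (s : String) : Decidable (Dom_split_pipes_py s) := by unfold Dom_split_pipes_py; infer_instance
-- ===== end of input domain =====

-- B replaces A's single accumulating pass by repeated find-first-unquoted-pipe + slicing (alternative decomposition, same return value).

-- ===== PORT A =====
-- state: (parts, current, quote, escape)
def stepA (st : List String × List Char × Option Char × Bool) (c : Char) :
    List String × List Char × Option Char × Bool :=
  let (p, cur, q, e) := st
  if e then (p, cur ++ [c], q, false)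
  else if c = '\\' then (p, cur ++ [c], q, true)
  else if c = '"' ∨ c = '\'' then
    (p, cur ++ [c], if q = some c then none else if q = none then some c else q, e)
  else if c = '|' ∧ q = none then (p ++ [String.ofList (PySem.Chars.strip cur)], [], q, e)
  else (p, cur ++ [c], q, e)

def split_pipes_py (s : String) : List String :=
  let st := s.toList.foldl stepA ([], [], none, false)
  if st.2.1 ≠ [] then st.1 ++ [String.ofList (PySem.Chars.strip st.2.1)] else st.1

-- ===== PORT B =====
-- _first_unquoted_pipe: index of the first pipe outside quotes/escapes, or none
def findPipeB : List Char → Option Char → Bool → Option Nat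
  | [], _, _ => none
  | c :: cs, q, e =>
    if e then (findPipeB cs q false).map (· + 1)
    else if c = '\\' then (findPipeB cs q true).map (· + 1)
    else if c = '"' ∨ c = '\'' then
      (findPipeB cs (if q = some c then none else if q = none then some c else q) e).map (· + 1)
    else if c = '|' ∧ q = none then some 0
    else (findPipeB cs q e).map (· + 1)

theorem findPipeB_lt : ∀ (cs : List Char) (q : Option Char) (e : Bool) (i : Nat),
    findPipeB cs q e = some i → i < cs.length := by
  intro cs
  induction cs with
  | nil => intro q e i h; simp [findPipeB] at h
  | cons c cs ih =>
    intro q e i h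
    simp only [findPipeB] at h
    by_cases h1 : e = true
    · rw [if_pos h1] at h
      rcases Option.map_eq_some_iff.mp h with ⟨j, hj, rfl⟩
      have := ih _ _ _ hj; simp only [List.length_cons]; omega
    · rw [if_neg h1] at h
      by_cases h2 : c = '\\'
      · rw [if_pos h2] at h
        rcases Option.map_eq_some_iff.mp h with ⟨j, hj, rfl⟩
        have := ih _ _ _ hj; simp only [List.length_cons]; omega
      · rw [if_neg h2] at h
        by_cases h3 : c = '"' ∨ c = '\''
        · rw [if_pos h3] at h
          rcases Option.map_eq_some_iff.mp h with ⟨j, hj, rfl⟩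
          have := ih _ _ _ hj; simp only [List.length_cons]; omega
        · rw [if_neg h3] at h
          by_cases h4 : c = '|' ∧ q = none
          · rw [if_pos h4] at h
            simp only [Option.some.injEq] at h
            simp only [List.length_cons]; omega
          · rw [if_neg h4] at h
            rcases Option.map_eq_some_iff.mp h with ⟨j, hj, rfl⟩
            have := ih _ _ _ hj; simp only [List.length_cons]; omega

-- the while loop of _split_pipes, with `parts` as accumulator
def splitB (cs : List Char) (parts : List String) : List String :=
  match h : findPipeB cs none false with
  | none => if cs = [] then parts else parts ++ [String.ofList (PySem.Chars.strip cs)]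
  | some i => splitB (cs.drop (i + 1)) (parts ++ [String.ofList (PySem.Chars.strip (cs.take i))])
termination_by cs.length
decreasing_by
  have := findPipeB_lt cs none false i h
  simp only [List.length_drop]; omega

def split_pipes_py_alt (s : String) : List String := splitB s.toList []

-- ===== PRECONDITION & SPEC =====
def Spec_split_pipes_py (s : String) (out : List String) : Prop := out = split_pipes_py_alt s
instance (s : String) (out : List String) : Decidable (Spec_split_pipes_py s out) := by unfold Spec_split_pipes_py; infer_instance

-- ===== CLAIM (what is proved, stated in full; the proofs are below) =====
def Claim_equal_split_pipes_py : Prop := ∀ (s : String), Dom_split_pipes_py s → Spec_split_pipes_py s (split_pipes_py s)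

-- ===== LEMMAS AND PROOFS =====

theorem splitB_none {cs : List Char} (parts : List String)
    (h : findPipeB cs none false = none) :
    splitB cs parts = if cs = [] then parts
      else parts ++ [String.ofList (PySem.Chars.strip cs)] := by
  rw [splitB]
  split
  · rfl
  · next i heq => rw [h] at heq; cases heq

theorem splitB_some {cs : List Char} (parts : List String) {i : Nat}
    (h : findPipeB cs none false = some i) :
    splitB cs parts =
      splitB (cs.drop (i + 1)) (parts ++ [String.ofList (PySem.Chars.strip (cs.take i))]) := by
  rw [splitB]
  split
  · next heq => rw [h] at heq; cases heq
  · next j heq => rw [h] at heq; cases heq; rfl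

-- no unquoted pipe from state (q,e): A's fold only appends to `current`
theorem foldA_noPipe : ∀ (cs : List Char) (p : List String) (cur : List Char)
    (q : Option Char) (e : Bool), findPipeB cs q e = none →
    (cs.foldl stepA (p, cur, q, e)).1 = p ∧ (cs.foldl stepA (p, cur, q, e)).2.1 = cur ++ cs := by
  intro cs
  induction cs with
  | nil => intro p cur q e _; simp
  | cons c cs ih =>
    intro p cur q e h
    simp only [findPipeB] at h
    simp only [List.foldl_cons, stepA]
    by_cases h1 : e = true
    · rw [if_pos h1] at h ⊢
      rcases ih _ (cur ++ [c]) _ _ (Option.map_eq_none_iff.mp h) with ⟨g1, g2⟩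
      exact ⟨g1, by simp [g2]⟩
    · rw [if_neg h1] at h ⊢
      by_cases h2 : c = '\\'
      · rw [if_pos h2] at h ⊢
        rcases ih _ (cur ++ [c]) _ _ (Option.map_eq_none_iff.mp h) with ⟨g1, g2⟩
        exact ⟨g1, by simp [g2]⟩
      · rw [if_neg h2] at h ⊢
        by_cases h3 : c = '"' ∨ c = '\''
        · rw [if_pos h3] at h ⊢
          rcases ih _ (cur ++ [c]) _ _ (Option.map_eq_none_iff.mp h) with ⟨g1, g2⟩
          exact ⟨g1, by simp [g2]⟩
        · rw [if_neg h3] at h ⊢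
          by_cases h4 : c = '|' ∧ q = none
          · rw [if_pos h4] at h; cases h
          · rw [if_neg h4] at h ⊢
            rcases ih _ (cur ++ [c]) _ _ (Option.map_eq_none_iff.mp h) with ⟨g1, g2⟩
            exact ⟨g1, by simp [g2]⟩

-- first unquoted pipe at i: A's fold flushes strip(cur ++ take i) and restarts fresh
theorem foldA_pipe : ∀ (cs : List Char) (i : Nat) (p : List String) (cur : List Char)
    (q : Option Char) (e : Bool), findPipeB cs q e = some i →
    cs.foldl stepA (p, cur, q, e) =
      (cs.drop (i + 1)).foldl stepA
        (p ++ [String.ofList (PySem.Chars.strip (cur ++ cs.take i))], [], none, false) := by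
  intro cs
  induction cs with
  | nil => intro i p cur q e h; simp [findPipeB] at h
  | cons c cs ih =>
    intro i p cur q e h
    simp only [findPipeB] at h
    simp only [List.foldl_cons, stepA]
    by_cases h1 : e = true
    · rw [if_pos h1] at h ⊢
      rcases Option.map_eq_some_iff.mp h with ⟨j, hj, rfl⟩
      rw [ih _ _ (cur ++ [c]) _ _ hj]; simp
    · rw [if_neg h1] at h ⊢
      by_cases h2 : c = '\\'
      · rw [if_pos h2] at h ⊢
        rcases Option.map_eq_some_iff.mp h with ⟨j, hj, rfl⟩
        rw [ih _ _ (cur ++ [c]) _ _ hj]; simp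
      · rw [if_neg h2] at h ⊢
        by_cases h3 : c = '"' ∨ c = '\''
        · rw [if_pos h3] at h ⊢
          rcases Option.map_eq_some_iff.mp h with ⟨j, hj, rfl⟩
          rw [ih _ _ (cur ++ [c]) _ _ hj]; simp
        · rw [if_neg h3] at h ⊢
          by_cases h4 : c = '|' ∧ q = none
          · rw [if_pos h4] at h ⊢
            simp only [Option.some.injEq] at h
            obtain rfl : i = 0 := h.symm
            obtain ⟨-, rfl⟩ := h4
            have he : e = false := by simpa using h1
            subst he; simp
          · rw [if_neg h4] at h ⊢
            rcases Option.map_eq_some_iff.mp h with ⟨j, hj, rfl⟩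
            rw [ih _ _ (cur ++ [c]) _ _ hj]; simp

-- main bridge: finishing A's fold from a fresh segment state equals B's loop
theorem foldA_eq_splitB : ∀ (n : Nat) (cs : List Char), cs.length ≤ n → ∀ (p : List String),
    (if (cs.foldl stepA (p, [], none, false)).2.1 ≠ [] then
        (cs.foldl stepA (p, [], none, false)).1 ++
          [String.ofList (PySem.Chars.strip (cs.foldl stepA (p, [], none, false)).2.1)]
      else (cs.foldl stepA (p, [], none, false)).1) = splitB cs p := by
  intro n
  induction n with
  | zero =>
    intro cs hlen p
    have hnil : cs = [] := List.eq_nil_of_length_eq_zero (Nat.le_zero.mp hlen)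
    subst hnil
    rw [splitB_none p (by simp [findPipeB])]
    simp
  | succ n ih =>
    intro cs hlen p
    cases hfp : findPipeB cs none false with
    | none =>
      rcases foldA_noPipe cs p [] none false hfp with ⟨h1, h2⟩
      simp only [List.nil_append] at h2
      rw [splitB_none p hfp, h1, h2]
      by_cases hcs : cs = [] <;> simp [hcs]
    | some i =>
      rw [foldA_pipe cs i p [] none false hfp]
      have hi := findPipeB_lt cs none false i hfp
      have hlen' : (cs.drop (i + 1)).length ≤ n := by
        simp only [List.length_drop]; omega
      rw [splitB_some p hfp]
      simpa using ih (cs.drop (i + 1)) hlen'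
        (p ++ [String.ofList (PySem.Chars.strip (cs.take i))])

-- ===== VERDICT (by name: the statement is the Claim_ definition above) =====
theorem split_pipes_py_spec : Claim_equal_split_pipes_py := by
  intro s _
  unfold Spec_split_pipes_py split_pipes_py split_pipes_py_alt
  exact foldA_eq_splitB s.toList.length s.toList le_rfl []
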